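-- pv_equiv track=rewrite | github.com/diogoandrade1999/FP-1ano | aula08/exercicio3.py | remove_e_conta
-- ===== SOURCE A (Python) =====
-- def remove_e_conta(lista, x):
-- 	lista2 = []
-- 	count = 0
-- 	for i in lista:
-- 		if i == x:
-- 			count += 1
-- 		else:
-- 			lista2.append(i)
-- 	return lista2, count
-- ===== SOURCE B (Python) =====
-- def remove_e_conta(lista, x):
--     count = lista.count(x)
--     lista2 = [i for i in lista if i != x]
--     return lista2, count
-- ===== Notes on version B (the rewrite author's own statement) =====
-- stated objective: idiomatic
-- what changed: Replaced the single counter-and-append loop with two independent passes: lista.count(x) for the count and a filter comprehension for the remaining elements.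
import Mathlib
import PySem

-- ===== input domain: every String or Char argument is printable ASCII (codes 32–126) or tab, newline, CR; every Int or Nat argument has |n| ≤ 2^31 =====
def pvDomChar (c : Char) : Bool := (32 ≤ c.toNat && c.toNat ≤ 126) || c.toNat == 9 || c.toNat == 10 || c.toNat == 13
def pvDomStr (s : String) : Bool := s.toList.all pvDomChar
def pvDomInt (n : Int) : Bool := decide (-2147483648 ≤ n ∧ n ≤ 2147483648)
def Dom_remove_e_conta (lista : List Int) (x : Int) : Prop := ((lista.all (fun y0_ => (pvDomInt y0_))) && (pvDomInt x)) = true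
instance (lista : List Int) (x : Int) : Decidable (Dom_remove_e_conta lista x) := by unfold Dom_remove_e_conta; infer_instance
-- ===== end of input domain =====

-- B replaces A's single interleaved counter/append loop by two independent passes (count, then filter); idiomatic, same cost.

-- ===== PORT A =====
-- one loop carrying (lista2, count), branching per element
def remove_e_conta (lista : List Int) (x : Int) : List Int × Int :=
  lista.foldl (fun (st : List Int × Int) i =>
    if i == x then (st.1, st.2 + 1) else (st.1 ++ [i], st.2)) ([], 0)

-- ===== PORT B =====
-- pass 1: count; pass 2: filter comprehension
def remove_e_conta_alt (lista : List Int) (x : Int) : List Int × Int :=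
  (lista.filter (fun i => i != x), PySem.List.count lista x)

-- ===== PRECONDITION & SPEC =====
def Spec_remove_e_conta (lista : List Int) (x : Int) (out : List Int × Int) : Prop := out = remove_e_conta_alt lista x
instance (lista : List Int) (x : Int) (out : List Int × Int) : Decidable (Spec_remove_e_conta lista x out) := by unfold Spec_remove_e_conta; infer_instance

-- ===== CLAIM (what is proved, stated in full; the proofs are below) =====
def Claim_equal_remove_e_conta : Prop := ∀ (lista : List Int) (x : Int), Dom_remove_e_conta lista x → Spec_remove_e_conta lista x (remove_e_conta lista x)

-- ===== LEMMAS AND PROOFS =====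
theorem remove_e_conta_foldl_inv (lista : List Int) (x : Int) (acc : List Int) (c : Int) :
    lista.foldl (fun (st : List Int × Int) i =>
      if i == x then (st.1, st.2 + 1) else (st.1 ++ [i], st.2)) (acc, c)
    = (acc ++ lista.filter (fun i => i != x), c + PySem.List.count lista x) := by
  induction lista generalizing acc c with
  | nil => simp [PySem.List.count]
  | cons h t ih =>
    simp only [List.foldl]
    by_cases hx : h = x
    · rw [if_pos (by simpa using hx), ih]
      simp [hx, PySem.List.count, List.filter, Prod.ext_iff]
      ring
    · rw [if_neg (by simpa using hx), ih]
      have hb : (h != x) = true := by simpa using hx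
      simp [hx, hb, PySem.List.count, List.filter]

-- ===== VERDICT (by name: the statement is the Claim_ definition above) =====
theorem remove_e_conta_spec : Claim_equal_remove_e_conta := by
  intro lista x _
  show _ = _
  unfold remove_e_conta remove_e_conta_alt
  rw [remove_e_conta_foldl_inv]
  simp
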